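-- pv_equiv track=rewrite | github.com/petemoore/REVOLUTIONER | src/CommandLineManager.py | getParametersMap
-- ===== SOURCE A (Python) =====
-- def getParametersMap(command_line_args):
--       parametersMap={}
--
--       action=command_line_args[0]
--
--       parametersMap[action]=[]
--
--       previousParameter=action
--
--       for item in command_line_args[1:]:
--         if item.startswith('-'):
--             parametersMap[item]=[]
--             previousParameter=item
--         else:
--             parametersMap[previousParameter].append(item)
--       return action, parametersMap
-- ===== SOURCE B (Python) =====
-- def getParametersMap(command_line_args):
--     action = command_line_args[0]
--     n = len(command_line_args)
--     # boundary indices: the action at 0, plus every flag position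
--     bounds = [0] + [i for i in range(1, n) if command_line_args[i].startswith('-')]
--     parametersMap = {}
--     for b, e in zip(bounds, bounds[1:] + [n]):
--         # duplicate flags overwrite, so the last run wins (as in A)
--         parametersMap[command_line_args[b]] = command_line_args[b + 1:e]
--     return action, parametersMap
-- ===== Notes on version B (the rewrite author's own statement) =====
-- stated objective: alternative
-- what changed: B first collects the boundary indices (index 0 plus every '-'-flag position) and then builds the map by inserting, for each consecutive boundary pair, the boundary token with the slice of tokens between them (dict overwrite makes duplicate flags keep the last run), replacing A's single stateful pass that tracks previousParameter and appends item by item.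
-- outside the precondition, e.g. on getParametersMap([]): A raises IndexError, B raises IndexError
import Mathlib
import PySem

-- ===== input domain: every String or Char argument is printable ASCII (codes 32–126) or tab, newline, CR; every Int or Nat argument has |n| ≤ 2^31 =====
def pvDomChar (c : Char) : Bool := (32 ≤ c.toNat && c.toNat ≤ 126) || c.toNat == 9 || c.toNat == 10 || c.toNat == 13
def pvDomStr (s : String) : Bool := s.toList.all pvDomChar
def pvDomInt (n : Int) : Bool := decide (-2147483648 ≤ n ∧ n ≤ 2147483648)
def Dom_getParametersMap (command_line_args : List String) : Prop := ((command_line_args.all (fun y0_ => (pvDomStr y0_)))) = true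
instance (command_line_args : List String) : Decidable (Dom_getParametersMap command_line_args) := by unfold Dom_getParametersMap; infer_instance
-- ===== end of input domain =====

-- B groups the argument list by boundary indices (the action plus every '-'-flag position) and
-- inserts one slice per boundary, instead of A's single stateful pass; objective: alternative.

-- ===== PORT A =====
-- the append 'parametersMap[previousParameter].append(item)' is a modify at a key that is always
-- present (previousParameter is inserted before it becomes previous), so the default [] is never used
def getParametersMap (command_line_args : List String) : String × (List (String × List String)) :=
  match command_line_args with
  | [] => ("", [])  -- command_line_args[0] raises IndexError here; excluded by Pre_
  | action :: rest =>
    let st := rest.foldl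
      (fun (st : PySem.Dict String (List String) × String) item =>
        if PySem.Str.startswith item "-" then (st.1.insert item [], item)
        else (st.1.modify st.2 [] (fun v => v ++ [item]), st.2))
      ((PySem.Dict.empty).insert action [], action)
    (action, st.1.items)

-- ===== PORT B =====
def getParametersMap_alt (command_line_args : List String) : String × (List (String × List String)) :=
  match command_line_args with
  | [] => ("", [])  -- command_line_args[0] raises IndexError here; excluded by Pre_
  | action :: _ =>
    let args := command_line_args
    let n : Int := args.length
    let bounds : List Int :=
      0 :: (PySem.List.pyRange 1 n).filter
        (fun i => PySem.Str.startswith ((PySem.List.pyGet? args i).getD "") "-")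
    let d : PySem.Dict String (List String) :=
      (bounds.zip (bounds.tail ++ [n])).foldl
        (fun d p => d.insert ((PySem.List.pyGet? args p.1).getD "")
                              (PySem.List.slice args (some (p.1 + 1)) (some p.2)))
        PySem.Dict.empty
    (action, d.items)

-- ===== PRECONDITION & SPEC =====
-- A raises IndexError on the empty list (command_line_args[0]); that is the only exclusion
def Pre_getParametersMap (command_line_args : List String) : Prop := command_line_args ≠ []
instance (command_line_args : List String) : Decidable (Pre_getParametersMap command_line_args) := by unfold Pre_getParametersMap; infer_instance
def pvWitness_getParametersMap : List String := ["run", "-v", "x", "y", "-f"]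
def Spec_getParametersMap (command_line_args : List String) (out : String × (List (String × List String))) : Prop := out = getParametersMap_alt command_line_args
instance (command_line_args : List String) (out : String × (List (String × List String))) : Decidable (Spec_getParametersMap command_line_args out) := by unfold Spec_getParametersMap; infer_instance

-- ===== CLAIM (what is proved, stated in full; the proofs are below) =====
def Claim_equal_getParametersMap : Prop := ∀ (command_line_args : List String), Dom_getParametersMap command_line_args → Pre_getParametersMap command_line_args → Spec_getParametersMap command_line_args (getParametersMap command_line_args)

-- ===== LEMMAS AND PROOFS =====

-- the common segmentation both programs compute: (key, run of following values) groups, in order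
def pvGroups (prev : String) (acc : List String) : List String → List (String × List String)
  | [] => [(prev, acc)]
  | x :: l =>
    if PySem.Str.startswith x "-" then (prev, acc) :: pvGroups x [] l
    else pvGroups prev (acc ++ [x]) l

def pvIns (d : PySem.Dict String (List String)) (p : String × List String) : PySem.Dict String (List String) :=
  d.insert p.1 p.2

def pvStepA (st : PySem.Dict String (List String) × String) (item : String) :
    PySem.Dict String (List String) × String :=
  if PySem.Str.startswith item "-" then (st.1.insert item [], item)
  else (st.1.modify st.2 [] (fun v => v ++ [item]), st.2)

lemma pvA_fold (l : List String) (d : PySem.Dict String (List String)) (prev : String)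
    (acc : List String) :
    (l.foldl pvStepA (d.insert prev acc, prev)).1 = (pvGroups prev acc l).foldl pvIns d := by
  induction l generalizing d prev acc with
  | nil => simp [pvGroups, pvIns]
  | cons x l ih =>
    simp only [List.foldl_cons, pvStepA, pvGroups]
    by_cases h : PySem.Str.startswith x "-"
    · simp only [if_pos h]
      rw [ih (d.insert prev acc) x []]
      simp [pvIns]
    · simp only [if_neg h]
      have : (d.insert prev acc).modify prev [] (fun v => v ++ [x]) = d.insert prev (acc ++ [x]) := by
        simp [PySem.Dict.modify, PySem.Dict.getD_insert_self, PySem.Dict.insert_insert_self]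
      rw [this, ih d prev (acc ++ [x])]

-- flag positions of args in the index window [j, j+k)
def pvIdxs (args : List String) (j k : Nat) : List Nat :=
  (List.range' j k).filter (fun i => PySem.Str.startswith (args.getD i "") "-")

-- the (key, run) pairs B reads off a boundary list bs (ends = bs.tail ++ [n]), in Nat indices
def pvPairsF (args : List String) (p : Nat × Nat) : String × List String :=
  (args.getD p.1 "", (args.drop (p.1 + 1)).take (p.2 - (p.1 + 1)))

def pvPairs (args : List String) (bs : List Nat) (n : Nat) : List (String × List String) :=
  (bs.zip (bs.tail ++ [n])).map (pvPairsF args)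

lemma pvPairs_cons (args : List String) (b : Nat) (bs : List Nat) (n : Nat) :
    pvPairs args (b :: bs) n = pvPairsF args (b, bs.headD n) :: pvPairs args bs n := by
  cases bs <;> simp [pvPairs]

lemma pvB_struct (l : List String) (j b : Nat) (args : List String)
    (hdrop : args.drop j = l) (hbj : b < j) (hlen : j + l.length = args.length) :
    pvPairs args (b :: pvIdxs args j l.length) args.length
      = pvGroups (args.getD b "") ((args.drop (b + 1)).take (j - (b + 1))) l := by
  induction l generalizing j b with
  | nil =>
    have hj : j = args.length := by simpa using hlen
    simp [pvIdxs, pvPairs, pvPairsF, pvGroups, hj]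
  | cons x l ih =>
    have hjx : args[j]? = some x := by
      have h0 := congrArg (fun t => t[0]?) hdrop
      simpa [List.getElem?_drop] using h0
    have hx : args.getD j "" = x := by
      simp [List.getD_eq_getElem?_getD, hjx]
    have hdrop' : args.drop (j + 1) = l := by
      have := congrArg List.tail hdrop
      simpa [List.tail_drop] using this
    have hlen' : (j + 1) + l.length = args.length := by
      simp at hlen; omega
    have hrange : pvIdxs args j (x :: l).length
        = (if PySem.Str.startswith (args.getD j "") "-" then [j] else [])
            ++ pvIdxs args (j + 1) l.length := by
      simp only [pvIdxs, List.length_cons, List.range'_succ, List.filter_cons]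
      split
      · simp
      · simp
    by_cases h : PySem.Str.startswith x "-"
    · rw [hrange, hx, if_pos h]
      simp only [List.cons_append, List.nil_append]
      rw [pvPairs_cons]
      rw [ih (j + 1) j hdrop' (by omega) hlen']
      simp only [pvGroups, pvPairsF, List.headD_cons, if_pos h, Nat.sub_self, List.take_zero, hx]
    · rw [hrange, hx, if_neg h]
      simp only [List.nil_append]
      rw [ih (j + 1) b hdrop' (by omega) hlen']
      simp only [pvGroups, if_neg h]
      congr 1
      have : (args.drop (b + 1)).take (j + 1 - (b + 1))
          = (args.drop (b + 1)).take (j - (b + 1)) ++ [x] := by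
        have hsub : j + 1 - (b + 1) = (j - (b + 1)) + 1 := by omega
        rw [hsub, List.take_add_one]
        have hget : (args.drop (b + 1))[j - (b + 1)]? = some x := by
          rw [List.getElem?_drop]
          have he : b + 1 + (j - (b + 1)) = j := by omega
          rw [he, hjx]
        simp [hget]
      rw [this]

lemma pvRange_cast (j k : Nat) :
    PySem.List.pyRange (j : Int) ((j + k : Nat) : Int) = (List.range' j k).map Nat.cast := by
  induction k generalizing j with
  | zero => simp [pysem]
  | succ k ih =>
    rw [PySem.List.pyRange_one_cons (by push_cast; omega), List.range'_succ]
    simp only [List.map_cons]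
    congr 1
    have h := ih (j + 1)
    push_cast at h ⊢
    convert h using 2; ring

lemma pvRange_cast' (m : Nat) :
    PySem.List.pyRange 1 (((m + 1 : Nat) : Int)) = (List.range' 1 m).map Nat.cast := by
  have h := pvRange_cast 1 m
  have e1 : ((1 : Nat) : Int) = 1 := by norm_num
  have e2 : ((1 + m : Nat) : Int) = ((m + 1 : Nat) : Int) := by push_cast; ring
  rw [e1, e2] at h
  exact h

lemma pvB_fold_cast (args : List String) (bs : List Nat) (n : Nat) :
    (((bs.map (Nat.cast : Nat → Int)).zip ((bs.map (Nat.cast : Nat → Int)).tail ++ [(n : Int)])).foldl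
       (fun d p => d.insert ((PySem.List.pyGet? args p.1).getD "")
          (PySem.List.slice args (some (p.1 + 1)) (some p.2))) PySem.Dict.empty)
      = (pvPairs args bs n).foldl pvIns PySem.Dict.empty := by
  rw [← List.map_tail, show ([(n : Int)] = [n].map (Nat.cast : Nat → Int)) from by simp,
      ← List.map_append, List.zip_map, List.foldl_map]
  unfold pvPairs
  rw [List.foldl_map]
  congr 1
  funext d q
  rcases q with ⟨b, e⟩
  have hc1 : ((b : Int) + 1) = ((b + 1 : Nat) : Int) := by push_cast; ring
  simp only [Prod.map, pvIns, pvPairsF, PySem.List.pyGet?_natCast, hc1,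
             PySem.List.slice_natCast, List.getD_eq_getElem?_getD]

-- ===== VERDICT (by name: the statement is the Claim_ definition above) =====
theorem getParametersMap_spec : Claim_equal_getParametersMap := by
  intro args _ hpre
  unfold Spec_getParametersMap
  match args, hpre with
  | action :: rest, _ =>
    -- A reduces to the grouped fold
    have hA : getParametersMap (action :: rest)
        = (action, ((rest.foldl pvStepA ((PySem.Dict.empty).insert action [], action)).1).items) := rfl
    rw [pvA_fold rest PySem.Dict.empty action []] at hA
    -- B: unfold the port, push the casts through, and apply the segmentation lemma
    have hB : getParametersMap_alt (action :: rest)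
        = (action,
           ((((0 : Int) :: (PySem.List.pyRange 1 (((action :: rest).length : Nat) : Int)).filter
                (fun i => PySem.Str.startswith ((PySem.List.pyGet? (action :: rest) i).getD "") "-")).zip
             ((((0 : Int) :: (PySem.List.pyRange 1 (((action :: rest).length : Nat) : Int)).filter
                (fun i => PySem.Str.startswith ((PySem.List.pyGet? (action :: rest) i).getD "") "-")).tail)
               ++ [(((action :: rest).length : Nat) : Int)])).foldl
             (fun d p => d.insert ((PySem.List.pyGet? (action :: rest) p.1).getD "")
                 (PySem.List.slice (action :: rest) (some (p.1 + 1)) (some p.2)))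
             PySem.Dict.empty).items) := rfl
    have hlen : ((action :: rest).length : Nat) = rest.length + 1 := by simp
    rw [hlen, pvRange_cast' rest.length] at hB
    have hfilt : ((List.range' 1 rest.length).map (Nat.cast : Nat → Int)).filter
          (fun i => PySem.Str.startswith ((PySem.List.pyGet? (action :: rest) i).getD "") "-")
        = (pvIdxs (action :: rest) 1 rest.length).map Nat.cast := by
      rw [List.filter_map]
      unfold pvIdxs
      congr 1
      apply List.filter_congr
      intro i _
      simp only [Function.comp, PySem.List.pyGet?_natCast, List.getD_eq_getElem?_getD]
    rw [hfilt] at hB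
    have hzero : (0 : Int) :: (pvIdxs (action :: rest) 1 rest.length).map (Nat.cast : Nat → Int)
        = ((0 :: pvIdxs (action :: rest) 1 rest.length).map (Nat.cast : Nat → Int)) := by simp
    rw [hzero, pvB_fold_cast (action :: rest) (0 :: pvIdxs (action :: rest) 1 rest.length) (rest.length + 1)] at hB
    have hstruct := pvB_struct rest 1 0 (action :: rest) (by simp) (by omega) (by simp [Nat.add_comm])
    simp only [List.length_cons] at hstruct
    rw [show ((action :: rest).getD 0 "") = action from rfl] at hstruct
    simp only [show ((action :: rest).drop (0 + 1)).take (1 - (0 + 1)) = ([] : List String) from by simp] at hstruct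
    rw [hstruct] at hB
    rw [hA, hB]
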